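-- pv_equiv track=rewrite | github.com/Qiskit/qiskit | qiskit/transpiler/passes/paulihedral/block_ordering.py | str_lex_key
-- ===== SOURCE A (Python) =====
-- def str_lex_key(weighted_pauli_str):
--     value = 0
--     '''q0 corresponds to the right-most pauli op'''
--     weighted_pauli_str=weighted_pauli_str[0]
--     for op in str(weighted_pauli_str):
--         value *= 4
--         if op == 'I':
--             value += 0
--         elif op == 'X':
--             value += 1
--         elif op == 'Y':
--             value += 2
--         elif op == 'Z':
--             value += 3
--     return -value
-- ===== SOURCE B (Python) =====
-- _DIGIT = {'I': '0', 'X': '1', 'Y': '2', 'Z': '3'}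
--
-- def str_lex_key(weighted_pauli_str):
--     digits = ''.join(_DIGIT.get(c, '0') for c in str(weighted_pauli_str[0]))
--     return -int(digits, 4) if digits else 0
-- ===== Notes on version B (the rewrite author's own statement) =====
-- stated objective: idiomatic
-- what changed: Replaces the explicit Horner multiply-add loop over if/elif branches with a dict lookup mapping each Pauli char to a base-4 digit char, joining them and parsing in one shot with int(digits, 4).
import Mathlib
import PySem

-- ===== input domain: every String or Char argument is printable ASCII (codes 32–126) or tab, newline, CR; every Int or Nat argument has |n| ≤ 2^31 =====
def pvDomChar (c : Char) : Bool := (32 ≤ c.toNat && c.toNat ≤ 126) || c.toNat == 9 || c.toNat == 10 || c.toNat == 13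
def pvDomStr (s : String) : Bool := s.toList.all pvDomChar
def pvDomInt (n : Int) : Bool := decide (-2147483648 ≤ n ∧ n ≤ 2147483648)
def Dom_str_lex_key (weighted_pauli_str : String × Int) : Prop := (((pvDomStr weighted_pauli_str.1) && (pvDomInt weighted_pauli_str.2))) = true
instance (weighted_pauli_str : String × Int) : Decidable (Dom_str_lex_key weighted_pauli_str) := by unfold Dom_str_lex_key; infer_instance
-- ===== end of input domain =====

-- ===== PORT A =====
-- B replaces A's Horner if/elif loop by mapping each char to a base-4 digit char and parsing in one shot (idiomatic; same cost).
def str_lex_key (weighted_pauli_str : String × Int) : Int :=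
  -(weighted_pauli_str.1.toList.foldl
      (fun value op =>
        let value := value * 4
        if op = 'I' then value + 0
        else if op = 'X' then value + 1
        else if op = 'Y' then value + 2
        else if op = 'Z' then value + 3
        else value)
      0)

-- ===== PORT B =====
-- digit char for one Pauli op (B's _DIGIT.get(c, '0'))
def pvDigitOf (c : Char) : Char :=
  if c = 'I' then '0' else if c = 'X' then '1' else if c = 'Y' then '2' else if c = 'Z' then '3' else '0'

-- int(digits, 4): standard base-4 parse of a digit-char list
def pvParse4 (ds : List Char) : Int :=
  ds.foldl (fun v d => v * 4 + Int.ofNat (d.toNat - 48)) 0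

def str_lex_key_alt (weighted_pauli_str : String × Int) : Int :=
  let digits := weighted_pauli_str.1.toList.map pvDigitOf
  if digits.isEmpty then 0 else -(pvParse4 digits)

-- ===== PRECONDITION & SPEC =====
def Spec_str_lex_key (weighted_pauli_str : String × Int) (out : Int) : Prop := out = str_lex_key_alt weighted_pauli_str
instance (weighted_pauli_str : String × Int) (out : Int) : Decidable (Spec_str_lex_key weighted_pauli_str out) := by unfold Spec_str_lex_key; infer_instance

-- ===== CLAIM (what is proved, stated in full; the proofs are below) =====
def Claim_equal_str_lex_key : Prop := ∀ (weighted_pauli_str : String × Int), Dom_str_lex_key weighted_pauli_str → Spec_str_lex_key weighted_pauli_str (str_lex_key weighted_pauli_str)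

-- ===== LEMMAS AND PROOFS =====

-- ===== VERDICT (by name: the statement is the Claim_ definition above) =====
theorem pv_fold_eq (l : List Char) (acc : Int) :
    l.foldl
      (fun value op =>
        let value := value * 4
        if op = 'I' then value + 0
        else if op = 'X' then value + 1
        else if op = 'Y' then value + 2
        else if op = 'Z' then value + 3
        else value)
      acc
    = (l.map pvDigitOf).foldl (fun v d => v * 4 + Int.ofNat (d.toNat - 48)) acc := by
  induction l generalizing acc with
  | nil => rfl
  | cons c t ih =>
      simp only [List.foldl, List.map]
      rw [ih]
      congr 1
      unfold pvDigitOf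
      split_ifs <;> simp

theorem str_lex_key_spec : Claim_equal_str_lex_key := by
  intro p _
  unfold Spec_str_lex_key str_lex_key str_lex_key_alt pvParse4
  rw [pv_fold_eq]
  cases h : p.1.toList with
  | nil => simp
  | cons c t => simp [h]
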